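-- pv_equiv track=rewrite | github.com/Vitosh/AlgoTests | rmq.py | get_left_and_right_children
-- ===== SOURCE A (Python) =====
-- def get_left_and_right_children(node, level):
--     nodeRightChild = node
--     nodeLeftChild = node
--
--     while level>0:
--         nodeLeftChild = 2*nodeLeftChild + 1
--         nodeRightChild  = 2*nodeRightChild +2
--         level-=1
--     return ([nodeLeftChild, nodeRightChild])
-- ===== SOURCE B (Python) =====
-- def get_left_and_right_children(node, level):
--     # Closed form: after k doubling steps, left = p*node + (p-1), right = p*node + 2*(p-1), p = 2**k.
--     k = level if level > 0 else 0
--     p = 1 << k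
--     return [p * node + p - 1, p * (node + 2) - 2]
-- ===== Notes on version B (the rewrite author's own statement) =====
-- stated objective: faster
-- what changed: Replaced the O(level) doubling loop with the closed form p=2**level: left = p*node+p-1, right = p*(node+2)-2; intended as faster (measured 1235x at n=65536, largest size both finished).
import Mathlib
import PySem

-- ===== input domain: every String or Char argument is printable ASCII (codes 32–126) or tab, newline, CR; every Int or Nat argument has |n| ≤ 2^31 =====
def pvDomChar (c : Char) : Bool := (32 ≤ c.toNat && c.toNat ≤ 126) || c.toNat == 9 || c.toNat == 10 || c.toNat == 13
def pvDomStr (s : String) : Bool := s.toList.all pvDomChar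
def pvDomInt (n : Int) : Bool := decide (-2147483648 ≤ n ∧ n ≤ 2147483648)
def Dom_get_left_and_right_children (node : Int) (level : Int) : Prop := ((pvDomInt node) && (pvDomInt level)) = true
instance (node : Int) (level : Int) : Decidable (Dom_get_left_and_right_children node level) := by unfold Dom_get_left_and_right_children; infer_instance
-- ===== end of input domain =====

-- B replaces A's O(level) doubling loop by the closed form p = 2^level; intended as faster (timing run measured 1235x at n=65536, the largest size both finished).


-- ===== PORT A =====
-- the while loop: state (nodeLeftChild, nodeRightChild), counter level
def glrcLoop (l r level : Int) : Int × Int :=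
  if level > 0 then glrcLoop (2 * l + 1) (2 * r + 2) (level - 1) else (l, r)
termination_by level.toNat
decreasing_by omega

def get_left_and_right_children (node : Int) (level : Int) : List Int :=
  let s := glrcLoop node node level
  [s.1, s.2]

-- ===== PORT B =====
def get_left_and_right_children_alt (node : Int) (level : Int) : List Int :=
  let k : Int := if level > 0 then level else 0
  let p : Int := 2 ^ k.toNat
  [p * node + p - 1, p * (node + 2) - 2]

-- ===== PRECONDITION & SPEC =====
def Spec_get_left_and_right_children (node : Int) (level : Int) (out : List Int) : Prop := out = get_left_and_right_children_alt node level
instance (node : Int) (level : Int) (out : List Int) : Decidable (Spec_get_left_and_right_children node level out) := by unfold Spec_get_left_and_right_children; infer_instance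

-- ===== CLAIM (what is proved, stated in full; the proofs are below) =====
def Claim_equal_get_left_and_right_children : Prop := ∀ (node : Int) (level : Int), Dom_get_left_and_right_children node level → Spec_get_left_and_right_children node level (get_left_and_right_children node level)

-- ===== LEMMAS AND PROOFS =====
theorem glrcLoop_closed (n : Nat) : ∀ (l r level : Int), level.toNat = n →
    glrcLoop l r level = (2 ^ n * l + (2 ^ n - 1), 2 ^ n * r + 2 * (2 ^ n - 1)) := by
  induction n with
  | zero =>
    intro l r level h
    have hle : ¬ level > 0 := by omega
    rw [glrcLoop, if_neg hle]
    simp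
  | succ m ih =>
    intro l r level h
    have hgt : level > 0 := by omega
    rw [glrcLoop, if_pos hgt, ih (2 * l + 1) (2 * r + 2) (level - 1) (by omega)]
    have : (2:Int) ^ (m + 1) = 2 ^ m * 2 := pow_succ 2 m
    rw [Prod.mk.injEq]
    constructor <;> (rw [this]; ring)

-- ===== VERDICT (by name: the statement is the Claim_ definition above) =====
theorem get_left_and_right_children_spec : Claim_equal_get_left_and_right_children := by
  intro node level _
  unfold Spec_get_left_and_right_children get_left_and_right_children get_left_and_right_children_alt
  rw [glrcLoop_closed level.toNat node node level rfl]
  by_cases h : level > 0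
  · simp only [if_pos h]
    ring_nf
  · simp only [if_neg h]
    have : level.toNat = 0 := by omega
    rw [this]
    norm_num
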